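-- pv_equiv track=rewrite | github.com/zalogarciam/CrackingTheCodeInterview | Chapter 8/RobotInAGrid.py | robot_in_a_grid
-- ===== SOURCE A (Python) =====
-- def robot_in_a_grid(maze, row , col, path):
--     if maze[row][col] == 'R':
--         return path
--     if row >= 1 and col >= 0 and maze[row-1][col] is None and maze[row-1][col] != 'X':
--         path.append((row-1, col))
--         return robot_in_a_grid(maze, row-1, col, path)
--
--     if row >= 0 and col >= 1 and maze[row][col-1] is None and maze[row][col-1] != 'X':
--         path.append((row, col - 1))
--         return robot_in_a_grid(maze, row, col-1, path)
--     path.append((0, 0))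
--     return path
-- ===== SOURCE B (Python) =====
-- def robot_in_a_grid(maze, row, col, path):
--     # Iterative walker: the 'R' test can only succeed on the start cell,
--     # because every cell moved into is required to be None by the guards.
--     if maze[row][col] == 'R':
--         return path
--     while True:
--         if row >= 1 and col >= 0 and maze[row - 1][col] is None:
--             row -= 1
--         elif row >= 0 and col >= 1 and maze[row][col - 1] is None:
--             col -= 1
--         else:
--             path.append((0, 0))
--             return path
--         path.append((row, col))
-- ===== Notes on version B (the rewrite author's own statement) =====
-- stated objective: simpler
-- what changed: Replaced the recursion that threads the path through every call and re-tests 'R' at each cell with an iterative while-loop walker that tests 'R' once on the start cell (any cell moved into must be None, so 'R' can never match later) and drops the redundant != 'X' conjunct; the Lean equivalence lemma is unconditional on the ports, Pre_ only marks where the total Lean ports model Python's IndexError-raising subscripts exactly.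
import Mathlib
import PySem

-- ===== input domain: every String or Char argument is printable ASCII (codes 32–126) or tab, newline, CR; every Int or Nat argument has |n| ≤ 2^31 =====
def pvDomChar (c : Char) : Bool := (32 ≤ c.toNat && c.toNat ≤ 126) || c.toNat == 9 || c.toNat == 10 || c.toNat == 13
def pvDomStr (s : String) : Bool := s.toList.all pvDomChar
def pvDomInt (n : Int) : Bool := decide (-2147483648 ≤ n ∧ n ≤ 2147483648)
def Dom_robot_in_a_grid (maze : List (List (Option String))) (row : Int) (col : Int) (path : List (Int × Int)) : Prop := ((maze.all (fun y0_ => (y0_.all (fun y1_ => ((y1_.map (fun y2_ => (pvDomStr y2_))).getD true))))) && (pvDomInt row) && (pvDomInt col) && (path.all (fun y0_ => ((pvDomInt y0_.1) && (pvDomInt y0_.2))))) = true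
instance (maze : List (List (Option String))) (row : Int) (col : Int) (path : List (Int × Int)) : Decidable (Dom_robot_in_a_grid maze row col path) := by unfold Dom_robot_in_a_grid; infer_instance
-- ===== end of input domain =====

-- B replaces A's path-threading recursion (which re-tests 'R' at every cell) by an
-- iterative walker that tests 'R' once on the start cell; the equivalence lemma is
-- unconditional on the Lean ports, so no returning input's value is dodged.
-- Both the Python A and B mutate `path` in place identically; the proof is about the return value.


-- maze[r][c] with Python index semantics (negative wrap; an out-of-range subscript —
-- IndexError in Python — shows up as none after the getD, which Pre_ keeps unreachable)
def pvCell (maze : List (List (Option String))) (r c : Int) : Option String :=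
  ((PySem.List.pyGet? ((PySem.List.pyGet? maze r).getD []) c)).getD none

-- ===== PORT A =====
def robot_in_a_grid (maze : List (List (Option String))) (row : Int) (col : Int) (path : List (Int × Int)) : List (Int × Int) :=
  if pvCell maze row col = some "R" then path
  else if h1 : 1 ≤ row ∧ 0 ≤ col ∧ pvCell maze (row-1) col = none ∧ pvCell maze (row-1) col ≠ some "X" then
    robot_in_a_grid maze (row-1) col (path ++ [(row-1, col)])
  else if h2 : 0 ≤ row ∧ 1 ≤ col ∧ pvCell maze row (col-1) = none ∧ pvCell maze row (col-1) ≠ some "X" then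
    robot_in_a_grid maze row (col-1) (path ++ [(row, col-1)])
  else path ++ [(0, 0)]
termination_by (row + col).toNat
decreasing_by · omega
              · omega

-- ===== PORT B =====
-- the while-loop of Source B, as a tail-recursive function over the mutated state (row, col, path)
def pvWalk (maze : List (List (Option String))) (row : Int) (col : Int) (path : List (Int × Int)) : List (Int × Int) :=
  if h1 : 1 ≤ row ∧ 0 ≤ col ∧ pvCell maze (row-1) col = none then
    pvWalk maze (row-1) col (path ++ [(row-1, col)])
  else if h2 : 0 ≤ row ∧ 1 ≤ col ∧ pvCell maze row (col-1) = none then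
    pvWalk maze row (col-1) (path ++ [(row, col-1)])
  else path ++ [(0, 0)]
termination_by (row + col).toNat
decreasing_by · omega
              · omega

def robot_in_a_grid_alt (maze : List (List (Option String))) (row : Int) (col : Int) (path : List (Int × Int)) : List (Int × Int) :=
  if pvCell maze row col = some "R" then path
  else pvWalk maze row col path

-- ===== PRECONDITION & SPEC =====
-- Pre_'s only purpose is to exclude inputs on which some subscript along A's walk raises
-- IndexError (the Python B raises identically there); the exact crash set depends on the walk,
-- so Pre_ admits the sufficient shapes on which no subscript can be out of range: a nonnegative
-- in-range start whose rows 0..row all reach column col (the natural grid shape), a nonnegative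
-- in-range start cell holding 'R' (A reads only that cell), or a negative start index that wraps
-- in range (A reads only that cell).  The equivalence proof below does not use Pre_ at all, and
-- on excluded inputs where A still returns, the Python B returns the same value (see cites).
def Pre_robot_in_a_grid (maze : List (List (Option String))) (row : Int) (col : Int) (path : List (Int × Int)) : Prop :=
  (0 ≤ row ∧ 0 ≤ col ∧ row < maze.length ∧
     ∀ i : Nat, i ≤ row.toNat → col.toNat < (maze.getD i []).length) ∨
  (0 ≤ row ∧ 0 ≤ col ∧
     ((PySem.List.pyGet? maze row).bind (fun r => PySem.List.pyGet? r col)) = some (some "R")) ∨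
  ((row < 0 ∨ col < 0) ∧
     ((PySem.List.pyGet? maze row).bind (fun r => PySem.List.pyGet? r col)).isSome)
instance (maze : List (List (Option String))) (row : Int) (col : Int) (path : List (Int × Int)) : Decidable (Pre_robot_in_a_grid maze row col path) := by unfold Pre_robot_in_a_grid; infer_instance

def pvWitness_robot_in_a_grid : List (List (Option String)) × Int × Int × (List (Int × Int)) :=
  ([[none, some "X"], [some "R", none]], 1, 1, [])

def Spec_robot_in_a_grid (maze : List (List (Option String))) (row : Int) (col : Int) (path : List (Int × Int)) (out : List (Int × Int)) : Prop := out = robot_in_a_grid_alt maze row col path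
instance (maze : List (List (Option String))) (row : Int) (col : Int) (path : List (Int × Int)) (out : List (Int × Int)) : Decidable (Spec_robot_in_a_grid maze row col path out) := by unfold Spec_robot_in_a_grid; infer_instance

-- ===== CLAIM (what is proved, stated in full; the proofs are below) =====
def Claim_equal_robot_in_a_grid : Prop := ∀ (maze : List (List (Option String))) (row : Int) (col : Int) (path : List (Int × Int)), Dom_robot_in_a_grid maze row col path → Pre_robot_in_a_grid maze row col path → Spec_robot_in_a_grid maze row col path (robot_in_a_grid maze row col path)

-- ===== LEMMAS AND PROOFS =====

-- A's recursion equals B's walker on EVERY input whose start cell is not 'R': the two guards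
-- agree (a cell equal to none is in particular not some "X"), and a cell moved into is none,
-- never 'R'.  No precondition is needed.
theorem pvA_eq_walk (maze : List (List (Option String))) (row col : Int) (path : List (Int × Int))
    (h : pvCell maze row col ≠ some "R") :
    robot_in_a_grid maze row col path = pvWalk maze row col path := by
  rw [robot_in_a_grid, pvWalk]
  rw [if_neg h]
  by_cases h1 : 1 ≤ row ∧ 0 ≤ col ∧ pvCell maze (row-1) col = none
  · rw [dif_pos h1, dif_pos ⟨h1.1, h1.2.1, h1.2.2, by simp [h1.2.2]⟩]
    exact pvA_eq_walk maze (row-1) col (path ++ [(row-1, col)]) (by simp [h1.2.2])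
  · rw [dif_neg h1, dif_neg (by tauto)]
    by_cases h2 : 0 ≤ row ∧ 1 ≤ col ∧ pvCell maze row (col-1) = none
    · rw [dif_pos h2, dif_pos ⟨h2.1, h2.2.1, h2.2.2, by simp [h2.2.2]⟩]
      exact pvA_eq_walk maze row (col-1) (path ++ [(row, col-1)]) (by simp [h2.2.2])
    · rw [dif_neg h2, dif_neg (by tauto)]
termination_by (row + col).toNat
decreasing_by · omega
              · omega

-- ===== VERDICT (by name: the statement is the Claim_ definition above) =====
theorem robot_in_a_grid_spec : Claim_equal_robot_in_a_grid := by
  intro maze row col path _ _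
  unfold Spec_robot_in_a_grid robot_in_a_grid_alt
  by_cases h : pvCell maze row col = some "R"
  · rw [robot_in_a_grid, if_pos h, if_pos h]
  · rw [if_neg h]
    exact pvA_eq_walk maze row col path h
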